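-- pv_equiv track=rewrite | github.com/tapanauti/ARC | src/manual_solve.py | solve_08ed6ac7
-- ===== SOURCE A (Python) =====
-- import re,copy
--
-- def solve_08ed6ac7(x):
--     z = copy.deepcopy(x)
--     colours = [1,2,3,4]                     #The list of colours, blue, red, green, yellow
--     counter = 0                             #counter value for identifying element in colour list
--
--     for i in range(len(z)):                     #Iterating downward through the grid, left to right
--         for j in range(len(z)):
--             if(z[i][j] == 5):                   # If a square is grey, iterate down that column and assign
--                 for x in range(i,len(z)):       # it a value of the next colour in the list
--                     z[x][j] = colours[counter]
--                 counter += 1                    #increment the counter for the values in the colour list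
--     return z
-- ===== SOURCE B (Python) =====
-- import copy
--
-- def solve_08ed6ac7(x):
--     z = copy.deepcopy(x)
--     n = len(z)
--     colours = [1, 2, 3, 4]
--     # pass 1: for each column, record the topmost grey cell (i, j)
--     tops = []
--     for j in range(n):
--         for i in range(n):
--             if z[i][j] == 5:
--                 tops.append((i, j))
--                 break
--     # sort by (row, column) = the row-major discovery order of the original
--     tops.sort()
--     # pass 2: fill each marked column downwards with the next colour
--     for idx, (i, j) in enumerate(tops):
--         c = colours[idx]
--         for r in range(i, n):
--             z[r][j] = c
--     return z
-- ===== Notes on version B (the rewrite author's own statement) =====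
-- stated objective: alternative
-- what changed: Replaces the single mutating row-major scan with a collect-then-fill decomposition: a per-column pass records each column's topmost grey cell into a table, the table is sorted by (row, column) to recover the row-major colour order, and a second pass fills the columns; no reads of the partially-mutated grid remain.
import Mathlib
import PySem

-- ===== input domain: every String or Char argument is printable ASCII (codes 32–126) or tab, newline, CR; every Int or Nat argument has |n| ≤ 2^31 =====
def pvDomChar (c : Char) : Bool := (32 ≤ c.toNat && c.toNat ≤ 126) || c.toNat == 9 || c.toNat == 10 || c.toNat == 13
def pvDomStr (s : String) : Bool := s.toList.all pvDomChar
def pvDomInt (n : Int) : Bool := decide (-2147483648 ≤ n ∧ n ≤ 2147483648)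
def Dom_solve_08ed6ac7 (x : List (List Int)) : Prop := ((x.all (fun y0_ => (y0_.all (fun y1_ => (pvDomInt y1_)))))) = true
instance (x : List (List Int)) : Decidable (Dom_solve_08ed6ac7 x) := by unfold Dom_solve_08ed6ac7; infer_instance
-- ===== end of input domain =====

-- B replaces A's single mutating row-major scan by a collect-then-fill decomposition (per-column table of
-- topmost grey cells, sorted by (row, column), then one filling pass); same cost, no reads of mutated state.
-- A mutates only a deepcopy, so there is no observable side effect to match.

-- ===== PORT A =====
-- z[i][j] read (Python raises if out of range; such inputs are excluded by Pre_ below)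
def gget (g : List (List Int)) (i j : Nat) : Int := (g.getD i []).getD j 0
-- z[i][j] = c  (in-range under Pre_)
def gset (g : List (List Int)) (i j : Nat) (c : Int) : List (List Int) :=
  g.set i ((g.getD i []).set j c)
-- for r in range(i, n): z[r][j] = c
def fillD (n : Nat) (g : List (List Int)) (i j : Nat) (c : Int) : List (List Int) :=
  (List.range' i (n - i)).foldl (fun z r => gset z r j c) g

def solve_08ed6ac7 (x : List (List Int)) : List (List Int) :=
  let n := x.length
  let colours : List Int := [1, 2, 3, 4]
  (((List.range n).foldl (fun (s : List (List Int) × Nat) i =>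
      (List.range n).foldl (fun (s : List (List Int) × Nat) j =>
        if gget s.1 i j = 5 then (fillD n s.1 i j (colours.getD s.2 0), s.2 + 1) else s) s)
    (x, 0))).1

-- ===== PORT B =====
def solve_08ed6ac7_alt (x : List (List Int)) : List (List Int) :=
  let n := x.length
  let colours : List Int := [1, 2, 3, 4]
  -- pass 1: per column j, the topmost grey row (inner loop with break = find?)
  let tops : List (Nat × Nat) := (List.range n).foldl (fun acc j =>
      acc ++ (match (List.range n).find? (fun i => gget x i j == 5) with
              | some i => [(i, j)]
              | none => [])) []
  -- tops.sort()  (tuples, lexicographic)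
  let sorted := PySem.List.sorted2 tops Prod.fst Prod.snd false
  -- pass 2: fill the columns, colour idx (enumerate) as a running counter
  ((sorted.foldl (fun (s : List (List Int) × Nat) p =>
      (fillD n s.1 p.1 p.2 (colours.getD s.2 0), s.2 + 1)) (x, 0))).1

-- ===== PRECONDITION & SPEC =====
-- Pre_ holds exactly where Python A returns: every row at least len(x) long (else z[i][j] raises
-- IndexError) and at most 4 of the first len(x) columns contain a grey 5 (a 5th fill raises
-- IndexError on colours[counter]).  The equivalence proof itself never needs the 4-colour bound;
-- it is part of Pre_ only because Python raises beyond it.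
def Pre_solve_08ed6ac7 (x : List (List Int)) : Prop :=
  (∀ row ∈ x, x.length ≤ row.length) ∧
  ((List.range x.length).filter (fun j =>
      (List.range x.length).any (fun i => (x.getD i []).getD j 0 == 5))).length ≤ 4
instance (x : List (List Int)) : Decidable (Pre_solve_08ed6ac7 x) := by
  unfold Pre_solve_08ed6ac7; infer_instance

def pvWitness_solve_08ed6ac7 : List (List Int) := [[5, 0], [0, 0]]

def Spec_solve_08ed6ac7 (x : List (List Int)) (out : List (List Int)) : Prop := out = solve_08ed6ac7_alt x
instance (x : List (List Int)) (out : List (List Int)) : Decidable (Spec_solve_08ed6ac7 x out) := by unfold Spec_solve_08ed6ac7; infer_instance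

-- ===== CLAIM (what is proved, stated in full; the proofs are below) =====
def Claim_equal_solve_08ed6ac7 : Prop := ∀ (x : List (List Int)), Dom_solve_08ed6ac7 x → Pre_solve_08ed6ac7 x → Spec_solve_08ed6ac7 x (solve_08ed6ac7 x)

-- ===== LEMMAS AND PROOFS =====

-- colours[counter] as a function of the counter
def colOf (k : Nat) : Int := ([1, 2, 3, 4] : List Int).getD k 0

-- one fill action with its counter bump (the shared shape of both ports' fill step)
def step (n : Nat) (s : List (List Int) × Nat) (p : Nat × Nat) : List (List Int) × Nat :=
  (fillD n s.1 p.1 p.2 (colOf s.2), s.2 + 1)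

-- "(i, j) is the topmost grey cell of column j"
def topB (x : List (List Int)) (i j : Nat) : Bool :=
  (gget x i j == 5) && decide (∀ k < i, gget x k j ≠ 5)

-- all topmost-grey cells in rows < i, row-major order
def topsTo (x : List (List Int)) (n i : Nat) : List (Nat × Nat) :=
  (List.range i).flatMap (fun i' => ((List.range n).filter (topB x i')).map (fun j => (i', j)))

-- topsTo plus the part of row i before column j
def topsPart (x : List (List Int)) (n i j : Nat) : List (Nat × Nat) :=
  topsTo x n i ++ ((List.range j).filter (topB x i)).map (fun j' => (i, j'))

-- the body of A's inner loop
def innerStep (n i : Nat) (s : List (List Int) × Nat) (j : Nat) : List (List Int) × Nat :=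
  if gget s.1 i j = 5 then step n s (i, j) else s

-- B's pass-1 table, as a flatMap
def colTops (x : List (List Int)) (n : Nat) : List (Nat × Nat) :=
  (List.range n).flatMap (fun j =>
    match (List.range n).find? (fun i => gget x i j == 5) with
    | some i => [(i, j)]
    | none => [])

-- lexicographic order on (row, column) pairs
def LexLE (p q : Nat × Nat) : Prop := p.1 < q.1 ∨ (p.1 = q.1 ∧ p.2 ≤ q.2)
def LexLT (p q : Nat × Nat) : Prop := p.1 < q.1 ∨ (p.1 = q.1 ∧ p.2 < q.2)

-- tuple comparison used by sorted2 with keys (fst, snd)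
def lexBef (p q : Nat × Nat) : Bool :=
  decide (p.1 < q.1) || (!decide (q.1 < p.1) && decide (p.2 < q.2))

theorem colOf_ne_five (k : Nat) : colOf k ≠ 5 := by
  rcases k with _|_|_|_|k <;> simp [colOf, List.getD]

theorem gget_gset (g : List (List Int)) (r j0 : Nat) (c : Int) (i j : Nat) :
    gget (gset g r j0 c) i j =
      if r = i ∧ j0 = j ∧ i < g.length ∧ j < (g.getD i []).length then c else gget g i j := by
  simp only [gget, gset, List.getD_eq_getElem?_getD, List.getElem?_set]
  by_cases hri : r = i
  · subst hri
    by_cases hr : r < g.length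
    · simp only [if_pos hr, List.getElem?_eq_getElem hr, Option.getD_some]
      by_cases hj : j0 = j
      · subst hj
        by_cases hjl : j0 < g[r].length
        · simp [hjl, hr]
        · rw [List.set_eq_of_length_le (by omega : g[r].length ≤ j0)]
          simp [hjl, hr]
      · simp [hj, hr]
    · simp [hr]
  · simp [hri]

theorem gset_length (g : List (List Int)) (r j0 : Nat) (c : Int) :
    (gset g r j0 c).length = g.length := by simp [gset]

theorem gset_row_length (g : List (List Int)) (r j0 : Nat) (c : Int) (i : Nat) :
    ((gset g r j0 c).getD i []).length = (g.getD i []).length := by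
  simp only [gset, List.getD_eq_getElem?_getD, List.getElem?_set]
  by_cases hri : r = i
  · subst hri
    by_cases hr : r < g.length <;> simp [hr]
  · simp [hri]

theorem foldl_gset_length (l : List Nat) (g : List (List Int)) (j0 : Nat) (c : Int) :
    (l.foldl (fun z r => gset z r j0 c) g).length = g.length := by
  induction l generalizing g with
  | nil => rfl
  | cons r l ih => simp [List.foldl_cons, ih, gset_length]

theorem fillD_length (n : Nat) (g : List (List Int)) (i0 j0 : Nat) (c : Int) :
    (fillD n g i0 j0 c).length = g.length := foldl_gset_length _ _ _ _

theorem gget_foldl_gset (cnt : Nat) : ∀ (s : Nat) (g : List (List Int)) (j0 : Nat) (c : Int) (i j : Nat),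
    g.length = s + cnt + (g.length - (s + cnt)) →
    gget ((List.range' s cnt).foldl (fun z r => gset z r j0 c) g) i j =
      if j0 = j ∧ s ≤ i ∧ i < s + cnt ∧ i < g.length ∧ j < (g.getD i []).length then c
      else gget g i j := by
  induction cnt with
  | zero => intro s g j0 c i j _; simp; intro _ _ h; omega
  | succ m ih =>
    intro s g j0 c i j hlen
    rw [List.range'_succ, List.foldl_cons]
    rw [ih (s+1) _ j0 c i j (by simp [gset_length]; omega)]
    rw [gset_row_length, gget_gset, gset_length]
    by_cases hj : j0 = j
    · subst hj
      split_ifs <;> first | rfl | (exfalso; omega)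
    · simp only [hj, false_and, and_false, if_false]

theorem gget_fillD (n : Nat) (g : List (List Int)) (i0 j0 : Nat) (c : Int) (i j : Nat)
    (hlen : g.length = n) (hi0 : i0 ≤ n) :
    gget (fillD n g i0 j0 c) i j =
      if j0 = j ∧ i0 ≤ i ∧ i < n ∧ j < (g.getD i []).length then c else gget g i j := by
  rw [fillD, gget_foldl_gset (n - i0) i0 g j0 c i j (by omega)]
  split_ifs <;> first | rfl | (exfalso; omega)

theorem gget_default (g : List (List Int)) (i j : Nat) (h : (g.getD i []).length ≤ j) :
    gget g i j = 0 := by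
  rw [gget, List.getD_eq_default]; omega

theorem gget_foldl_step (n : Nat) (d : List (Nat × Nat)) :
    ∀ (s : List (List Int) × Nat), s.1.length = n → ∀ (i j : Nat), i < n → j < n →
      (∀ p ∈ d, p.1 ≤ n) →
      (gget ((d.foldl (step n) s).1) i j = 5 ↔
        gget s.1 i j = 5 ∧ ∀ p ∈ d, ¬(p.2 = j ∧ p.1 ≤ i)) := by
  induction d with
  | nil => intro s _ i j _ _ _; simp
  | cons p d ih =>
    intro s hlen i j hi hj hd
    rw [List.foldl_cons]
    rw [ih (step n s p) (by rw [step]; simpa [fillD_length] using hlen) i j hi hj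
        (fun q hq => hd q (List.mem_cons_of_mem _ hq))]
    have hfill := gget_fillD n s.1 p.1 p.2 (colOf s.2) i j hlen (hd p List.mem_cons_self)
    have hstep1 : (step n s p).1 = fillD n s.1 p.1 p.2 (colOf s.2) := rfl
    rw [hstep1, hfill]
    by_cases hcov : p.2 = j ∧ p.1 ≤ i
    · by_cases hrl : j < (s.1.getD i []).length
      · rw [if_pos ⟨hcov.1, hcov.2, hi, hrl⟩]
        constructor
        · rintro ⟨h5, -⟩; exact absurd h5 (colOf_ne_five _)
        · rintro ⟨-, hall⟩; exact absurd hcov (hall p List.mem_cons_self)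
      · rw [if_neg (by tauto)]
        have h0 : gget s.1 i j = 0 := gget_default _ _ _ (by omega)
        constructor
        · rintro ⟨h5, -⟩; rw [h0] at h5; exact absurd h5 (by decide)
        · rintro ⟨-, hall⟩; exact absurd hcov (hall p List.mem_cons_self)
    · rw [if_neg (by tauto)]
      constructor
      · rintro ⟨h5, hall⟩
        exact ⟨h5, fun q hq => by
          rcases List.mem_cons.mp hq with h | h
          · subst h; exact hcov
          · exact hall q h⟩
      · rintro ⟨h5, hall⟩
        exact ⟨h5, fun q hq => hall q (List.mem_cons_of_mem _ hq)⟩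

theorem mem_topsTo (x : List (List Int)) (n i : Nat) (p : Nat × Nat) :
    p ∈ topsTo x n i ↔ p.1 < i ∧ p.2 < n ∧ topB x p.1 p.2 = true := by
  rcases p with ⟨a, b⟩
  simp only [topsTo, List.mem_flatMap, List.mem_map, List.mem_filter, List.mem_range]
  constructor
  · rintro ⟨i', hi', j, ⟨hj, ht⟩, heq⟩
    obtain ⟨rfl, rfl⟩ := Prod.mk.injEq .. ▸ heq
    exact ⟨hi', hj, ht⟩
  · rintro ⟨ha, hb, ht⟩
    exact ⟨a, ha, b, ⟨hb, ht⟩, rfl⟩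

theorem mem_topsPart (x : List (List Int)) (n i j : Nat) (p : Nat × Nat) :
    p ∈ topsPart x n i j ↔
      (p.1 < i ∧ p.2 < n ∧ topB x p.1 p.2 = true) ∨
      (p.1 = i ∧ p.2 < j ∧ topB x i p.2 = true) := by
  rcases p with ⟨a, b⟩
  simp only [topsPart, List.mem_append, mem_topsTo, List.mem_map, List.mem_filter, List.mem_range]
  constructor
  · rintro (h | ⟨j', ⟨hj', ht⟩, heq⟩)
    · exact Or.inl h
    · obtain ⟨rfl, rfl⟩ := Prod.mk.injEq .. ▸ heq
      exact Or.inr ⟨rfl, hj', ht⟩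
  · rintro (h | ⟨rfl, hb, ht⟩)
    · exact Or.inl h
    · exact Or.inr ⟨b, ⟨hb, ht⟩, rfl⟩

theorem topsPart_zero (x : List (List Int)) (n i : Nat) : topsPart x n i 0 = topsTo x n i := by
  simp [topsPart]

theorem topsTo_zero (x : List (List Int)) (n : Nat) : topsTo x n 0 = [] := by simp [topsTo]

theorem topsPart_succ (x : List (List Int)) (n i j : Nat) :
    topsPart x n i (j + 1) =
      if topB x i j then topsPart x n i j ++ [(i, j)] else topsPart x n i j := by
  by_cases h : topB x i j
  · simp [topsPart, List.range_succ, List.filter_append, h]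
  · simp [topsPart, List.range_succ, List.filter_append, h]

theorem topsTo_succ (x : List (List Int)) (n i : Nat) :
    topsTo x n (i + 1) = topsPart x n i n := by
  simp [topsTo, topsPart, List.range_succ]

theorem topsPart_fst_le (x : List (List Int)) (n i j : Nat) (hi : i < n) :
    ∀ p ∈ topsPart x n i j, p.1 ≤ n := by
  intro p hp
  rcases (mem_topsPart x n i j p).mp hp with h | h <;> omega

theorem trigger_iff (x : List (List Int)) (n i j : Nat) (hlen : x.length = n)
    (hi : i < n) (hj : j < n) :
    gget (((topsPart x n i j).foldl (step n) (x, 0)).1) i j = 5 ↔ topB x i j = true := by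
  rw [gget_foldl_step n _ (x, 0) hlen i j hi hj (topsPart_fst_le x n i j hi)]
  constructor
  · rintro ⟨h5, hall⟩
    rw [topB, Bool.and_eq_true, beq_iff_eq, decide_eq_true_iff]
    refine ⟨h5, fun k hk hk5 => ?_⟩
    have hex : ∃ m, gget x m j = 5 := ⟨k, hk5⟩
    set k0 := Nat.find hex with hk0
    have hk0lt : k0 < i := lt_of_le_of_lt (Nat.find_min' hex hk5) hk
    have htop : topB x k0 j = true := by
      rw [topB, Bool.and_eq_true, beq_iff_eq, decide_eq_true_iff]
      exact ⟨Nat.find_spec hex, fun m hm => Nat.find_min hex hm⟩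
    have hmem : ((k0, j) : Nat × Nat) ∈ topsPart x n i j :=
      (mem_topsPart x n i j _).mpr (Or.inl ⟨hk0lt, hj, htop⟩)
    exact hall _ hmem ⟨rfl, by omega⟩
  · intro ht
    rw [topB, Bool.and_eq_true, beq_iff_eq, decide_eq_true_iff] at ht
    refine ⟨ht.1, fun p hp ⟨hpj, hpi⟩ => ?_⟩
    rcases (mem_topsPart x n i j p).mp hp with ⟨h1, _, h3⟩ | ⟨h1, h2, _⟩
    · rw [topB, Bool.and_eq_true, beq_iff_eq] at h3
      exact ht.2 p.1 h1 (hpj ▸ h3.1)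
    · omega

theorem inner_loop (x : List (List Int)) (n i : Nat) (hlen : x.length = n) (hi : i < n) :
    ∀ (cnt j : Nat), j + cnt ≤ n →
      (List.range' j cnt).foldl (innerStep n i) ((topsPart x n i j).foldl (step n) (x, 0)) =
        (topsPart x n i (j + cnt)).foldl (step n) (x, 0) := by
  intro cnt
  induction cnt with
  | zero => intro j _; rfl
  | succ m ih =>
    intro j hcnt
    rw [List.range'_succ, List.foldl_cons]
    have hstep : innerStep n i ((topsPart x n i j).foldl (step n) (x, 0)) j =
        (topsPart x n i (j + 1)).foldl (step n) (x, 0) := by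
      rw [innerStep, topsPart_succ]
      by_cases ht : topB x i j = true
      · rw [if_pos ((trigger_iff x n i j hlen hi (by omega)).mpr ht), if_pos ht,
          List.foldl_append, List.foldl_cons, List.foldl_nil]
      · rw [if_neg (fun h => ht ((trigger_iff x n i j hlen hi (by omega)).mp h)),
          if_neg ht]
    rw [hstep, ih (j + 1) (by omega), show j + 1 + m = j + (m + 1) from by omega]

theorem outer_loop (x : List (List Int)) (n : Nat) (hlen : x.length = n) :
    ∀ (cnt i : Nat), i + cnt ≤ n →
      (List.range' i cnt).foldl (fun s i' => (List.range n).foldl (innerStep n i') s)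
          ((topsTo x n i).foldl (step n) (x, 0)) =
        (topsTo x n (i + cnt)).foldl (step n) (x, 0) := by
  intro cnt
  induction cnt with
  | zero => intro i _; rfl
  | succ m ih =>
    intro i hcnt
    rw [List.range'_succ, List.foldl_cons]
    have hrow : (List.range n).foldl (innerStep n i) ((topsTo x n i).foldl (step n) (x, 0)) =
        (topsTo x n (i + 1)).foldl (step n) (x, 0) := by
      rw [topsTo_succ, ← topsPart_zero x n i,
        List.range_eq_range']
      have := inner_loop x n i hlen (by omega) n 0 (by omega)
      simpa [topsPart_zero] using this
    rw [hrow, ih (i + 1) (by omega), show i + 1 + m = i + (m + 1) from by omega]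

theorem insertBy_lex_pairwise (z : Nat × Nat) (ys : List (Nat × Nat))
    (h : ys.Pairwise LexLE) : (PySem.List.insertBy lexBef z ys).Pairwise LexLE := by
  induction ys with
  | nil => simp [PySem.List.insertBy, LexLE]
  | cons y ys ih =>
    rw [PySem.List.insertBy]
    rcases List.pairwise_cons.mp h with ⟨hy, hys⟩
    by_cases hb : lexBef z y = true
    · rw [if_pos hb]
      refine List.pairwise_cons.mpr ⟨?_, h⟩
      intro b hb'
      have hzy : LexLT z y := by
        rw [lexBef, Bool.or_eq_true, Bool.and_eq_true] at hb
        rcases hb with h1 | ⟨h1, h2⟩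
        · exact Or.inl (of_decide_eq_true h1)
        · simp only [Bool.not_eq_true', decide_eq_false_iff_not, Nat.not_lt] at h1
          rcases Nat.lt_or_ge z.1 y.1 with h | h
          · exact Or.inl h
          · exact Or.inr ⟨(by omega : z.1 = y.1), of_decide_eq_true h2⟩
      rcases List.mem_cons.mp hb' with rfl | hmem
      · rcases hzy with h | ⟨h1, h2⟩
        · exact Or.inl h
        · exact Or.inr ⟨h1, Nat.le_of_lt h2⟩
      · have := hy b hmem
        rcases hzy with h | ⟨h1, h2⟩ <;> rcases this with h' | ⟨h1', h2'⟩ <;>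
          [exact Or.inl (by omega); exact Or.inl (by omega); exact Or.inl (by omega);
           exact Or.inr ⟨by omega, by omega⟩]
    · rw [if_neg hb]
      refine List.pairwise_cons.mpr ⟨?_, ih hys⟩
      intro b hbmem
      rcases PySem.List.insertBy_mem_iff .. |>.mp hbmem with rfl | hmem
      · rw [lexBef, Bool.or_eq_true, Bool.and_eq_true] at hb
        push Not at hb
        simp only [Bool.not_eq_true, decide_eq_false_iff_not, Nat.not_lt] at hb
        rcases hb with ⟨h1, h2⟩
        by_cases hlt : y.1 < b.1
        · exact Or.inl hlt
        · have h2' := h2 (by simpa using hlt)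
          exact Or.inr ⟨by omega, by omega⟩
      · exact hy b hmem

theorem foldl_insertBy_pairwise (xs : List (Nat × Nat)) :
    ∀ acc : List (Nat × Nat), acc.Pairwise LexLE →
      (xs.foldl (fun acc z => PySem.List.insertBy lexBef z acc) acc).Pairwise LexLE := by
  induction xs with
  | nil => intro acc h; exact h
  | cons z xs ih => intro acc h; exact ih _ (insertBy_lex_pairwise z acc h)

theorem sorted2_eq_foldl (xs : List (Nat × Nat)) :
    PySem.List.sorted2 xs Prod.fst Prod.snd false =
      xs.foldl (fun acc z => PySem.List.insertBy lexBef z acc) [] := rfl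

theorem sorted2_lex_eq (xs ys : List (Nat × Nat)) (hperm : ys.Perm xs)
    (hsort : ys.Pairwise LexLT) :
    PySem.List.sorted2 xs Prod.fst Prod.snd false = ys := by
  have hp1 : (PySem.List.sorted2 xs Prod.fst Prod.snd false).Perm ys :=
    (PySem.List.sorted2_perm xs Prod.fst Prod.snd false).trans hperm.symm
  have hs1 : (PySem.List.sorted2 xs Prod.fst Prod.snd false).Pairwise LexLE := by
    rw [sorted2_eq_foldl]
    exact foldl_insertBy_pairwise xs [] (List.Pairwise.nil)
  have hs2 : ys.Pairwise LexLE := hsort.imp (fun h => by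
    rcases h with h | ⟨h1, h2⟩
    · exact Or.inl h
    · exact Or.inr ⟨h1, Nat.le_of_lt h2⟩)
  exact List.eq_of_perm_of_sorted
    (fun a b _ _ hab hba => by
      rcases a with ⟨a1, a2⟩; rcases b with ⟨b1, b2⟩
      rcases hab with h | ⟨h1, h2⟩ <;> rcases hba with h' | ⟨h1', h2'⟩ <;>
        simp_all <;> omega)
    hs1 hs2 hp1

theorem find?_top (x : List (List Int)) (n j i : Nat) :
    (List.range n).find? (fun i => gget x i j == 5) = some i ↔
      i < n ∧ topB x i j = true := by
  rw [List.range_eq_range', List.find?_range'_eq_some]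
  simp only [beq_iff_eq, List.mem_range'_1, topB, Bool.and_eq_true, beq_iff_eq,
    decide_eq_true_iff, Bool.not_eq_eq_eq_not, Bool.not_true, beq_eq_false_iff_ne]
  constructor
  · rintro ⟨h5, ⟨-, hin⟩, hmin⟩
    exact ⟨by omega, h5, fun k hk => hmin k (by omega) hk⟩
  · rintro ⟨hin, h5, hmin⟩
    exact ⟨h5, ⟨by omega, by omega⟩, fun k _ hk => hmin k hk⟩

theorem mem_colTops (x : List (List Int)) (n : Nat) (p : Nat × Nat) :
    p ∈ colTops x n ↔ p.1 < n ∧ p.2 < n ∧ topB x p.1 p.2 = true := by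
  rcases p with ⟨a, b⟩
  simp only [colTops, List.mem_flatMap, List.mem_range]
  constructor
  · rintro ⟨j, hj, hmem⟩
    rcases hfind : (List.range n).find? (fun i => gget x i j == 5) with _ | i
    · rw [hfind] at hmem; simp at hmem
    · rw [hfind] at hmem
      simp only [List.mem_singleton, Prod.mk.injEq] at hmem
      obtain ⟨rfl, rfl⟩ := hmem
      rcases (find?_top x n b a).mp hfind with ⟨h1, h2⟩
      exact ⟨h1, hj, h2⟩
  · rintro ⟨ha, hb, ht⟩
    refine ⟨b, hb, ?_⟩
    rw [(find?_top x n b a).mpr ⟨ha, ht⟩]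
    simp

theorem pairwise_snd_colTops (x : List (List Int)) (n : Nat) :
    (colTops x n).Pairwise (fun p q => p.2 < q.2) := by
  rw [colTops, List.pairwise_flatMap]
  constructor
  · intro j _
    rcases (List.range n).find? (fun i => gget x i j == 5) with _ | i <;> simp
  · have : (List.range n).Pairwise (· < ·) := List.pairwise_lt_range
    refine this.imp_of_mem ?_
    intro j1 j2 _ _ hlt p hp q hq
    have hp2 : p.2 = j1 := by
      rcases hf : (List.range n).find? (fun i => gget x i j1 == 5) with _ | i <;> rw [hf] at hp
      · simp at hp
      · simp only [List.mem_singleton] at hp; rw [hp]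
    have hq2 : q.2 = j2 := by
      rcases hf : (List.range n).find? (fun i => gget x i j2 == 5) with _ | i <;> rw [hf] at hq
      · simp at hq
      · simp only [List.mem_singleton] at hq; rw [hq]
    omega

theorem pairwise_lex_topsTo (x : List (List Int)) (n : Nat) :
    (topsTo x n n).Pairwise LexLT := by
  rw [topsTo, List.pairwise_flatMap]
  constructor
  · intro i _
    rw [List.pairwise_map]
    have : ((List.range n).filter (topB x i)).Pairwise (· < ·) :=
      List.Pairwise.sublist List.filter_sublist List.pairwise_lt_range
    exact this.imp (fun h => Or.inr ⟨rfl, h⟩)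
  · have : (List.range n).Pairwise (· < ·) := List.pairwise_lt_range
    refine this.imp_of_mem ?_
    intro i1 i2 _ _ hlt p hp q hq
    rcases List.mem_map.mp hp with ⟨j1, -, rfl⟩
    rcases List.mem_map.mp hq with ⟨j2, -, rfl⟩
    exact Or.inl hlt

theorem nodup_topsTo (x : List (List Int)) (n : Nat) : (topsTo x n n).Nodup :=
  (pairwise_lex_topsTo x n).imp (fun h => by
    rintro rfl; rcases h with h | ⟨-, h⟩ <;> omega)

theorem nodup_colTops (x : List (List Int)) (n : Nat) : (colTops x n).Nodup :=
  (pairwise_snd_colTops x n).imp (fun h => by rintro rfl; omega)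

theorem sorted2_colTops_eq (x : List (List Int)) (n : Nat) :
    PySem.List.sorted2 (colTops x n) Prod.fst Prod.snd false = topsTo x n n := by
  refine sorted2_lex_eq _ _ ?_ (pairwise_lex_topsTo x n)
  refine (List.perm_ext_iff_of_nodup (nodup_topsTo x n) (nodup_colTops x n)).mpr ?_
  intro p
  rw [mem_topsTo, mem_colTops]

theorem portA_eq (x : List (List Int)) :
    solve_08ed6ac7 x =
      ((List.range x.length).foldl
        (fun s i => (List.range x.length).foldl (innerStep x.length i) s) (x, 0)).1 := rfl

theorem A_done (x : List (List Int)) :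
    solve_08ed6ac7 x = ((topsTo x x.length x.length).foldl (step x.length) (x, 0)).1 := by
  have h := outer_loop x x.length rfl x.length 0 (by omega)
  rw [topsTo_zero, List.foldl_nil, Nat.zero_add, ← List.range_eq_range'] at h
  rw [portA_eq, h]

theorem portB_eq (x : List (List Int)) :
    solve_08ed6ac7_alt x =
      ((PySem.List.sorted2 (colTops x x.length) Prod.fst Prod.snd false).foldl
        (step x.length) (x, 0)).1 := by
  rw [solve_08ed6ac7_alt]
  simp only [PySem.List.foldl_append_eq_flatMap, List.nil_append]
  rfl

theorem ports_eq (x : List (List Int)) : solve_08ed6ac7 x = solve_08ed6ac7_alt x := by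
  rw [A_done, portB_eq, sorted2_colTops_eq]

-- ===== VERDICT (by name: the statement is the Claim_ definition above) =====
theorem solve_08ed6ac7_spec : Claim_equal_solve_08ed6ac7 := by
  intro x _ _
  exact ports_eq x
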